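-- pv_equiv track=rewrite | github.com/R3conS/Sadidauto-Dofus-Retro-Bot | src/bot/_states/out_of_combat/_sub_states/hunting/_monster_tooltip_finder/_sorter.py | _get_tooltips_with_highest_monster_count
-- ===== SOURCE A (Python) =====
-- def _get_tooltips_with_highest_monster_count(tooltips: dict, monster_name: str):
--     highest_monster_count = 0
--     highest_monster_count_tooltips_keys = []
--
--     for key, tooltip_monsters in tooltips.items():
--         if tooltip_monsters.get(monster_name, 0) > highest_monster_count:
--             highest_monster_count = tooltip_monsters.get(monster_name, 0)
--             highest_monster_count_tooltips_keys = [key]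
--         elif tooltip_monsters.get(monster_name, 0) == highest_monster_count:
--             highest_monster_count_tooltips_keys.append(key)
--
--     return highest_monster_count_tooltips_keys
-- ===== SOURCE B (Python) =====
-- def _get_tooltips_with_highest_monster_count(tooltips: dict, monster_name: str):
--     highest = max([0] + [t.get(monster_name, 0) for t in tooltips.values()])
--     return [key for key, t in tooltips.items() if t.get(monster_name, 0) == highest]
-- ===== Notes on version B (the rewrite author's own statement) =====
-- stated objective: simpler
-- what changed: Replaces the interleaved running-max loop that resets/extends the key list in place with two plain passes: compute the 0-floored maximum count, then filter the keys equal to it.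
import Mathlib
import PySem

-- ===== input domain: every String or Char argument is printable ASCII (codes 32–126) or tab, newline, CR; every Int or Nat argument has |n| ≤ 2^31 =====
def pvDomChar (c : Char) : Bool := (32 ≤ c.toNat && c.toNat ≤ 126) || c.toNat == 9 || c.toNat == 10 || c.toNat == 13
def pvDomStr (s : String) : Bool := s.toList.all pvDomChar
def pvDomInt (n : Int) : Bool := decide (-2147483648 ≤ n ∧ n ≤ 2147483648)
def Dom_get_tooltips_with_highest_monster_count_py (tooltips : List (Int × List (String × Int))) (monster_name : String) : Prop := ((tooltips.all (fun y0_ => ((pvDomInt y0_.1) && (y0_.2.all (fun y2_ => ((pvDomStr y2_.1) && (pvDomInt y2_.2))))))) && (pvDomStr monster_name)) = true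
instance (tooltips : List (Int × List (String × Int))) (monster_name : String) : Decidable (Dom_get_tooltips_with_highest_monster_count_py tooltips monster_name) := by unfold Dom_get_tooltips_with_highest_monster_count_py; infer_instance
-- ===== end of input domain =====

-- B computes the same result in two plain passes (0-floored max count, then filter) instead of A's interleaved reset/append loop; objective: simpler.


-- ===== PORT A =====
-- tooltip_monsters.get(monster_name, 0)
def pvCnt (tm : List (String × Int)) (monster_name : String) : Int :=
  PySem.Dict.getD (PySem.Dict.mk tm) monster_name 0

def get_tooltips_with_highest_monster_count_py (tooltips : List (Int × List (String × Int))) (monster_name : String) : List Int :=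
  -- state: (highest_monster_count, highest_monster_count_tooltips_keys)
  (tooltips.foldl (fun st p =>
      if pvCnt p.2 monster_name > st.1 then (pvCnt p.2 monster_name, [p.1])
      else if pvCnt p.2 monster_name = st.1 then (st.1, st.2 ++ [p.1])
      else st)
    ((0 : Int), ([] : List Int))).2

-- ===== PORT B =====
def get_tooltips_with_highest_monster_count_py_alt (tooltips : List (Int × List (String × Int))) (monster_name : String) : List Int :=
  let highest := ((0 : Int) :: tooltips.map (fun p => pvCnt p.2 monster_name)).foldl max 0
  (tooltips.filter (fun p => pvCnt p.2 monster_name = highest)).map (·.1)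

-- ===== PRECONDITION & SPEC =====
def Spec_get_tooltips_with_highest_monster_count_py (tooltips : List (Int × List (String × Int))) (monster_name : String) (out : List Int) : Prop := out = get_tooltips_with_highest_monster_count_py_alt tooltips monster_name
instance (tooltips : List (Int × List (String × Int))) (monster_name : String) (out : List Int) : Decidable (Spec_get_tooltips_with_highest_monster_count_py tooltips monster_name out) := by unfold Spec_get_tooltips_with_highest_monster_count_py; infer_instance

-- ===== CLAIM (what is proved, stated in full; the proofs are below) =====
def Claim_equal_get_tooltips_with_highest_monster_count_py : Prop := ∀ (tooltips : List (Int × List (String × Int))) (monster_name : String), Dom_get_tooltips_with_highest_monster_count_py tooltips monster_name → Spec_get_tooltips_with_highest_monster_count_py tooltips monster_name (get_tooltips_with_highest_monster_count_py tooltips monster_name)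

-- ===== LEMMAS AND PROOFS =====

-- b ≤ foldl max b l
theorem pvLeFoldlMax (l : List Int) : ∀ b : Int, b ≤ l.foldl max b := by
  induction l with
  | nil => intro b; simp
  | cons x rest ih =>
    intro b
    exact le_trans (le_max_left b x) (by simpa using ih (max b x))

-- Invariant: starting A's loop from state (h, ks) with 0 ≤ h, the final key list is
-- ks kept iff the overall max equals h, followed by the keys whose count equals the overall max.
theorem pvLoop_inv (name : String) (l : List (Int × List (String × Int))) :
    ∀ (h : Int) (ks : List Int), 0 ≤ h →
    (l.foldl (fun st p =>
        if pvCnt p.2 name > st.1 then (pvCnt p.2 name, [p.1])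
        else if pvCnt p.2 name = st.1 then (st.1, st.2 ++ [p.1])
        else st) (h, ks)).2 =
      (if (l.map (fun p => pvCnt p.2 name)).foldl max h = h then ks else []) ++
      (l.filter (fun p => pvCnt p.2 name = (l.map (fun p => pvCnt p.2 name)).foldl max h)).map (·.1) := by
  induction l with
  | nil => intro h ks _; simp
  | cons p rest ih =>
    intro h ks hh
    simp only [List.foldl_cons, List.map_cons, List.filter_cons]
    by_cases hgt : pvCnt p.2 name > h
    · have hmax : max h (pvCnt p.2 name) = pvCnt p.2 name := by omega
      rw [if_pos hgt]
      rw [ih (pvCnt p.2 name) [p.1] (by omega)]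
      have hM : pvCnt p.2 name ≤ (rest.map (fun p => pvCnt p.2 name)).foldl max (pvCnt p.2 name) :=
        pvLeFoldlMax _ _
      simp only [hmax]
      have hne : (rest.map (fun p => pvCnt p.2 name)).foldl max (pvCnt p.2 name) ≠ h :=
        (lt_of_lt_of_le hgt hM).ne'
      rw [if_neg hne]
      by_cases he : pvCnt p.2 name = (rest.map (fun p => pvCnt p.2 name)).foldl max (pvCnt p.2 name)
      · rw [if_pos he.symm, if_pos (show (decide (pvCnt p.2 name = (rest.map (fun p => pvCnt p.2 name)).foldl max (pvCnt p.2 name))) = true by simpa using he)]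
        simp
      · rw [if_neg (fun hc => he hc.symm), if_neg (show ¬ (decide (pvCnt p.2 name = (rest.map (fun p => pvCnt p.2 name)).foldl max (pvCnt p.2 name))) = true by simpa using he)]
    · rw [if_neg hgt]
      have hmax : max h (pvCnt p.2 name) = h := by omega
      simp only [hmax]
      by_cases he : pvCnt p.2 name = h
      · rw [if_pos he]
        rw [ih h (ks ++ [p.1]) hh]
        by_cases hM : (rest.map (fun p => pvCnt p.2 name)).foldl max h = h
        · rw [if_pos hM, if_pos hM, if_pos (show (decide (pvCnt p.2 name = (rest.map (fun p => pvCnt p.2 name)).foldl max h)) = true by simp [he, hM])]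
          simp
        · rw [if_neg hM, if_neg hM, if_neg (show ¬ (decide (pvCnt p.2 name = (rest.map (fun p => pvCnt p.2 name)).foldl max h)) = true by simp [he]; exact fun hc => hM hc.symm)]
      · rw [if_neg he]
        rw [ih h ks hh]
        have hM : h ≤ (rest.map (fun p => pvCnt p.2 name)).foldl max h := pvLeFoldlMax _ _
        have hne2 : pvCnt p.2 name ≠ (rest.map (fun p => pvCnt p.2 name)).foldl max h := by
          intro hc; omega
        rw [if_neg (show ¬ (decide (pvCnt p.2 name = (rest.map (fun p => pvCnt p.2 name)).foldl max h)) = true by simpa using hne2)]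

-- ===== VERDICT (by name: the statement is the Claim_ definition above) =====
theorem get_tooltips_with_highest_monster_count_py_spec : Claim_equal_get_tooltips_with_highest_monster_count_py := by
  intro tooltips monster_name _
  unfold Spec_get_tooltips_with_highest_monster_count_py
  unfold get_tooltips_with_highest_monster_count_py get_tooltips_with_highest_monster_count_py_alt
  rw [pvLoop_inv monster_name tooltips 0 [] le_rfl]
  simp
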